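-- pv_equiv track=rewrite | github.com/yiqiwang-17/bk-log | apps/log_search/handlers/search/mapping_handlers.py | combine_es_fields
-- ===== SOURCE A (Python) =====
-- OUTER_PRODUCE_FIELDS = []
--
-- TIME_TYPE = ["date"]
--
-- def combine_es_fields(fields_list, time_field):
--     """
--     for es
--     :param fields_list:
--     :return:
--     """
--     final_fields_list = list()
--     commit_list = list()
--     common_list = list()
--     time_list = list()
--     produce_list = list()
--     for s_field in fields_list:
--         field_name = s_field["field_name"]
--         field_type = s_field["field_type"]
--         if isinstance(field_name, str):
--             field_name = field_name.lower()
--         if field_name in OUTER_PRODUCE_FIELDS: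
--             s_field["is_editable"] = False
--             produce_list.append(s_field)
--             continue
--         if field_name == time_field:
--             commit_list.append(s_field)
--         elif field_type in TIME_TYPE:
--             time_list.append(s_field)
--         else:
--             common_list.append(s_field)
--     final_fields_list.extend(commit_list)
--     final_fields_list.extend(time_list)
--     final_fields_list.extend(common_list)
--     final_fields_list.extend(produce_list)
--     return final_fields_list
-- ===== SOURCE B (Python) =====
-- OUTER_PRODUCE_FIELDS = []
--
-- TIME_TYPE = ["date"]
--
--
-- def combine_es_fields(fields_list, time_field):
--     """Tag each field with a sort priority, then stable-sort once by priority."""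
--     pairs = []
--     for s_field in fields_list:
--         field_name = s_field["field_name"]
--         field_type = s_field["field_type"]
--         if isinstance(field_name, str):
--             field_name = field_name.lower()
--         if field_name in OUTER_PRODUCE_FIELDS:
--             s_field["is_editable"] = False
--             prio = 3
--         elif field_name == time_field:
--             prio = 0
--         elif field_type in TIME_TYPE:
--             prio = 1
--         else:
--             prio = 2
--         pairs.append((prio, s_field))
--     pairs.sort(key=lambda p: p[0])
--     return [f for _, f in pairs]
-- ===== Notes on version B (the rewrite author's own statement) =====
-- stated objective: alternative
-- what changed: Replaces the four-bucket build-and-concatenate with a single tagging pass that assigns each field a priority integer (0 time_field, 1 date-typed, 2 other, 3 outer-produce) followed by one stable sort on the priority, relying on sort stability for intra-bucket order.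
import Mathlib
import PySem

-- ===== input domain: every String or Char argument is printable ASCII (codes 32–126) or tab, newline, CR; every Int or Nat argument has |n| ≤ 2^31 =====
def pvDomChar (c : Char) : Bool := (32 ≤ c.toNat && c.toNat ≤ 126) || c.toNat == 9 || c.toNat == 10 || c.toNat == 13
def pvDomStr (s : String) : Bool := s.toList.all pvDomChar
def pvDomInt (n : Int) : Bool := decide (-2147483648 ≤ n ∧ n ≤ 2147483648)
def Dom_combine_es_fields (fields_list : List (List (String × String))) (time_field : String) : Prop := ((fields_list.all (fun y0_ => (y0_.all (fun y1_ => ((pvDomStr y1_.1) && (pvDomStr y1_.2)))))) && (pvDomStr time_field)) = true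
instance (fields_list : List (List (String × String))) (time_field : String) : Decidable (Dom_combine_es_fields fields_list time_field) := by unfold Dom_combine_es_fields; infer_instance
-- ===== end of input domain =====

-- B replaces A's four-bucket build-and-concatenate by one tagging pass (a priority
-- integer per field) followed by a single stable sort on that priority: an
-- alternative decomposition of the same cost class, proved to return A's exact value.


-- ===== PORT A =====
def OUTER_PRODUCE_FIELDS : List String := []

def TIME_TYPE : List String := ["date"]

-- A's loop body over the four accumulator lists (commit_list, common_list, time_list,
-- produce_list). s_field["field_name"] / s_field["field_type"] raise KeyError when the
-- key is absent; Pre_ excludes those inputs, the port reads them with Dict.getD "".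
-- Python's `s_field["is_editable"] = False` in the produce branch stores a bool in a
-- str→str dict; OUTER_PRODUCE_FIELDS = [] makes that branch unreachable, so the port
-- keeps the branch (membership test and append) without that untypeable store.
def pvAStep (time_field : String)
    (st : List (List (String × String)) × List (List (String × String)) × List (List (String × String)) × List (List (String × String)))
    (s_field : List (String × String)) :
    List (List (String × String)) × List (List (String × String)) × List (List (String × String)) × List (List (String × String)) :=
  let commit_list := st.1
  let common_list := st.2.1
  let time_list := st.2.2.1
  let produce_list := st.2.2.2
  let field_name := PySem.Str.lower (PySem.Dict.getD ⟨s_field⟩ "field_name" "")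
  let field_type := PySem.Dict.getD (⟨s_field⟩ : PySem.Dict String String) "field_type" ""
  if field_name ∈ OUTER_PRODUCE_FIELDS then
    (commit_list, common_list, time_list, produce_list ++ [s_field])
  else if field_name == time_field then
    (commit_list ++ [s_field], common_list, time_list, produce_list)
  else if field_type ∈ TIME_TYPE then
    (commit_list, common_list, time_list ++ [s_field], produce_list)
  else
    (commit_list, common_list ++ [s_field], time_list, produce_list)

def combine_es_fields (fields_list : List (List (String × String))) (time_field : String) : List (List (String × String)) :=
  let r := fields_list.foldl (pvAStep time_field) ([], [], [], [])
  r.1 ++ r.2.2.1 ++ r.2.1 ++ r.2.2.2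

-- ===== PORT B =====
-- Literal port of Source B: one pass appending (priority, field) pairs, then a stable
-- sort by the priority and a projection. Same unreachable-produce-branch remark as in A.
def pvBStep (time_field : String)
    (acc : List (Int × List (String × String))) (s_field : List (String × String)) :
    List (Int × List (String × String)) :=
  let field_name := PySem.Str.lower (PySem.Dict.getD ⟨s_field⟩ "field_name" "")
  let field_type := PySem.Dict.getD (⟨s_field⟩ : PySem.Dict String String) "field_type" ""
  let prio : Int :=
    if field_name ∈ OUTER_PRODUCE_FIELDS then 3
    else if field_name == time_field then 0
    else if field_type ∈ TIME_TYPE then 1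
    else 2
  acc ++ [(prio, s_field)]

def combine_es_fields_alt (fields_list : List (List (String × String))) (time_field : String) : List (List (String × String)) :=
  let pairs := fields_list.foldl (pvBStep time_field) []
  (PySem.List.sorted pairs (fun p => p.1)).map (fun p => p.2)

-- ===== PRECONDITION & SPEC =====
-- Pre_: every field dict carries both the "field_name" and the "field_type" key;
-- A (and B) raise KeyError otherwise.
def Pre_combine_es_fields (fields_list : List (List (String × String))) (time_field : String) : Prop :=
  (fields_list.all (fun f => ((PySem.Dict.get? (⟨f⟩ : PySem.Dict String String) "field_name").isSome
    && (PySem.Dict.get? (⟨f⟩ : PySem.Dict String String) "field_type").isSome))) = true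

instance (fields_list : List (List (String × String))) (time_field : String) : Decidable (Pre_combine_es_fields fields_list time_field) := by unfold Pre_combine_es_fields; infer_instance

def pvWitness_combine_es_fields : (List (List (String × String))) × String :=
  ([[("field_name", "dtEventTimeStamp"), ("field_type", "date")],
    [("field_name", "Log"), ("field_type", "text")],
    [("field_name", "ts"), ("field_type", "date")]], "dteventtimestamp")

def Spec_combine_es_fields (fields_list : List (List (String × String))) (time_field : String) (out : List (List (String × String))) : Prop := out = combine_es_fields_alt fields_list time_field
instance (fields_list : List (List (String × String))) (time_field : String) (out : List (List (String × String))) : Decidable (Spec_combine_es_fields fields_list time_field out) := by unfold Spec_combine_es_fields; infer_instance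

-- ===== CLAIM (what is proved, stated in full; the proofs are below) =====
def Claim_equal_combine_es_fields : Prop := ∀ (fields_list : List (List (String × String))) (time_field : String), Dom_combine_es_fields fields_list time_field → Pre_combine_es_fields fields_list time_field → Spec_combine_es_fields fields_list time_field (combine_es_fields fields_list time_field)

-- ===== LEMMAS AND PROOFS =====

-- The priority both proofs normalise to (B's if-chain, also the order of A's branches).
def pvPrio (time_field : String) (s_field : List (String × String)) : Int :=
  if PySem.Str.lower (PySem.Dict.getD ⟨s_field⟩ "field_name" "") ∈ OUTER_PRODUCE_FIELDS then 3
  else if PySem.Str.lower (PySem.Dict.getD ⟨s_field⟩ "field_name" "") == time_field then 0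
  else if PySem.Dict.getD (⟨s_field⟩ : PySem.Dict String String) "field_type" "" ∈ TIME_TYPE then 1
  else 2

theorem insertBy_cons_unfold {α : Type} (before : α → α → Bool) (x y : α) (ys : List α) :
    PySem.List.insertBy before x (y :: ys) =
      if before x y then x :: y :: ys else y :: PySem.List.insertBy before x ys := rfl

theorem insertBy_append_of_not {α : Type} (before : α → α → Bool) (x : α) (ys zs : List α)
    (h : ∀ y ∈ ys, before x y = false) :
    PySem.List.insertBy before x (ys ++ zs) = ys ++ PySem.List.insertBy before x zs := by
  induction ys with
  | nil => simp
  | cons y t ih =>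
      have hy : before x y = false := h y (by simp)
      simp [insertBy_cons_unfold, hy, ih (fun z hz => h z (by simp [hz]))]

theorem insertBy_all_before {α : Type} (before : α → α → Bool) (x : α) (zs : List α)
    (h : ∀ y ∈ zs, before x y = true) :
    PySem.List.insertBy before x zs = x :: zs := by
  cases zs with
  | nil => rfl
  | cons z t => simp [insertBy_cons_unfold, h z (by simp)]

-- Stable insertion sort over keys drawn from {0,1,2,3} yields the four bucket filters.
theorem foldl_insertBy_buckets {α : Type} :
    ∀ (l c0 c1 c2 c3 : List (Int × α)),
    (∀ p ∈ c0, p.1 = 0) → (∀ p ∈ c1, p.1 = 1) → (∀ p ∈ c2, p.1 = 2) → (∀ p ∈ c3, p.1 = 3) →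
    (∀ p ∈ l, p.1 = 0 ∨ p.1 = 1 ∨ p.1 = 2 ∨ p.1 = 3) →
    l.foldl (fun acc x => PySem.List.insertBy (fun a b => decide (a.1 < b.1)) x acc) (c0 ++ c1 ++ c2 ++ c3)
      = (c0 ++ l.filter (fun p => p.1 == 0)) ++ (c1 ++ l.filter (fun p => p.1 == 1))
        ++ (c2 ++ l.filter (fun p => p.1 == 2)) ++ (c3 ++ l.filter (fun p => p.1 == 3)) := by
  intro l
  induction l with
  | nil => intro c0 c1 c2 c3 _ _ _ _ _; simp
  | cons x t ih =>
      intro c0 c1 c2 c3 h0 h1 h2 h3 hl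
      have hx := hl x (by simp)
      have ht : ∀ p ∈ t, p.1 = 0 ∨ p.1 = 1 ∨ p.1 = 2 ∨ p.1 = 3 := fun p hp => hl p (by simp [hp])
      simp only [List.foldl_cons]
      rcases hx with hk | hk | hk | hk
      · have hstep : PySem.List.insertBy (fun a b => decide (a.1 < b.1)) x (c0 ++ c1 ++ c2 ++ c3)
            = (c0 ++ [x]) ++ c1 ++ c2 ++ c3 := by
          rw [show c0 ++ c1 ++ c2 ++ c3 = c0 ++ (c1 ++ c2 ++ c3) by simp,
            insertBy_append_of_not _ _ _ _ (fun y hy => by simp [h0 y hy, hk]),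
            insertBy_all_before _ _ _ (fun y hy => by
              simp only [List.append_assoc, List.mem_append] at hy
              rcases hy with hy | hy | hy
              · simp [h1 y hy, hk]
              · simp [h2 y hy, hk]
              · simp [h3 y hy, hk])]
          simp
        rw [hstep, ih (c0 ++ [x]) c1 c2 c3
          (by intro p hp; rcases List.mem_append.1 hp with hp | hp
              · exact h0 p hp
              · simp at hp; simp [hp, hk]) h1 h2 h3 ht]
        simp [hk]
      · have hstep : PySem.List.insertBy (fun a b => decide (a.1 < b.1)) x (c0 ++ c1 ++ c2 ++ c3)
            = c0 ++ (c1 ++ [x]) ++ c2 ++ c3 := by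
          rw [show c0 ++ c1 ++ c2 ++ c3 = (c0 ++ c1) ++ (c2 ++ c3) by simp,
            insertBy_append_of_not _ _ _ _ (fun y hy => by
              rcases List.mem_append.1 hy with hy | hy
              · simp [h0 y hy, hk]
              · simp [h1 y hy, hk]),
            insertBy_all_before _ _ _ (fun y hy => by
              rcases List.mem_append.1 hy with hy | hy
              · simp [h2 y hy, hk]
              · simp [h3 y hy, hk])]
          simp
        rw [hstep, ih c0 (c1 ++ [x]) c2 c3 h0
          (by intro p hp; rcases List.mem_append.1 hp with hp | hp
              · exact h1 p hp
              · simp at hp; simp [hp, hk]) h2 h3 ht]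
        simp [hk]
      · have hstep : PySem.List.insertBy (fun a b => decide (a.1 < b.1)) x (c0 ++ c1 ++ c2 ++ c3)
            = c0 ++ c1 ++ (c2 ++ [x]) ++ c3 := by
          rw [show c0 ++ c1 ++ c2 ++ c3 = (c0 ++ c1 ++ c2) ++ c3 by simp,
            insertBy_append_of_not _ _ _ _ (fun y hy => by
              simp only [List.append_assoc, List.mem_append] at hy
              rcases hy with hy | hy | hy
              · simp [h0 y hy, hk]
              · simp [h1 y hy, hk]
              · simp [h2 y hy, hk]),
            insertBy_all_before _ _ _ (fun y hy => by simp [h3 y hy, hk])]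
          simp
        rw [hstep, ih c0 c1 (c2 ++ [x]) c3 h0 h1
          (by intro p hp; rcases List.mem_append.1 hp with hp | hp
              · exact h2 p hp
              · simp at hp; simp [hp, hk]) h3 ht]
        simp [hk]
      · have hstep : PySem.List.insertBy (fun a b => decide (a.1 < b.1)) x (c0 ++ c1 ++ c2 ++ c3)
            = c0 ++ c1 ++ c2 ++ (c3 ++ [x]) := by
          rw [PySem.List.insertBy_of_forall_not_before _ _ _ (fun y hy => by
            simp only [List.append_assoc, List.mem_append] at hy
            rcases hy with hy | hy | hy | hy
            · simp [h0 y hy, hk]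
            · simp [h1 y hy, hk]
            · simp [h2 y hy, hk]
            · simp [h3 y hy, hk])]
          simp
        rw [hstep, ih c0 c1 c2 (c3 ++ [x]) h0 h1 h2
          (by intro p hp; rcases List.mem_append.1 hp with hp | hp
              · exact h3 p hp
              · simp at hp; simp [hp, hk]) ht]
        simp [hk]

theorem prio_cases (time_field : String) (f : List (String × String)) :
    pvPrio time_field f = 0 ∨ pvPrio time_field f = 1 ∨ pvPrio time_field f = 2 ∨ pvPrio time_field f = 3 := by
  unfold pvPrio
  split_ifs <;> simp

-- A's fold with four accumulators computes the four priority filters.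
theorem A_eq_filters (time_field : String) :
    ∀ (l c0 c1 c2 c3 : List (List (String × String))),
    l.foldl (pvAStep time_field) (c0, c2, c1, c3)
    = (c0 ++ l.filter (fun f => pvPrio time_field f == 0),
       c2 ++ l.filter (fun f => pvPrio time_field f == 2),
       c1 ++ l.filter (fun f => pvPrio time_field f == 1),
       c3 ++ l.filter (fun f => pvPrio time_field f == 3)) := by
  intro l
  induction l with
  | nil => intro c0 c1 c2 c3; simp
  | cons f t ih =>
      intro c0 c1 c2 c3
      simp only [List.foldl_cons, List.filter_cons]
      by_cases hOut : PySem.Str.lower (PySem.Dict.getD ⟨f⟩ "field_name" "") ∈ OUTER_PRODUCE_FIELDS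
      · rw [show pvAStep time_field (c0, c2, c1, c3) f = (c0, c2, c1, c3 ++ [f]) by
          unfold pvAStep; simp [hOut]]
        rw [ih c0 c1 c2 (c3 ++ [f])]
        simp [pvPrio, hOut]
      · by_cases hTf : (PySem.Str.lower (PySem.Dict.getD ⟨f⟩ "field_name" "") == time_field) = true
        · rw [show pvAStep time_field (c0, c2, c1, c3) f = (c0 ++ [f], c2, c1, c3) by
            unfold pvAStep; simp [hOut, hTf]]
          rw [ih (c0 ++ [f]) c1 c2 c3]
          simp [pvPrio, hOut, hTf]
        · by_cases hDt : PySem.Dict.getD (⟨f⟩ : PySem.Dict String String) "field_type" "" ∈ TIME_TYPE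
          · rw [show pvAStep time_field (c0, c2, c1, c3) f = (c0, c2, c1 ++ [f], c3) by
              unfold pvAStep; simp [hOut, hTf, hDt]]
            rw [ih c0 (c1 ++ [f]) c2 c3]
            simp [pvPrio, hOut, hTf, hDt]
          · rw [show pvAStep time_field (c0, c2, c1, c3) f = (c0, c2 ++ [f], c1, c3) by
              unfold pvAStep; simp [hOut, hTf, hDt]]
            rw [ih c0 c1 (c2 ++ [f]) c3]
            simp [pvPrio, hOut, hTf, hDt]

-- B's tagging pass is the map with pvPrio.
theorem B_pairs_eq (time_field : String) (l : List (List (String × String))) :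
    l.foldl (pvBStep time_field) [] = l.map (fun f => (pvPrio time_field f, f)) := by
  have h1 := PySem.List.foldl_congr_mem (l := l)
    (init := ([] : List (Int × List (String × String))))
    (f := pvBStep time_field)
    (g := fun acc f => acc ++ [(pvPrio time_field f, f)])
    (fun acc f _ => rfl)
  rw [h1, PySem.List.foldl_append_singleton_eq_map]; simp

theorem B_eq_filters (fields_list : List (List (String × String))) (time_field : String) :
    combine_es_fields_alt fields_list time_field
      = fields_list.filter (fun f => pvPrio time_field f == 0)
        ++ fields_list.filter (fun f => pvPrio time_field f == 1)
        ++ fields_list.filter (fun f => pvPrio time_field f == 2)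
        ++ fields_list.filter (fun f => pvPrio time_field f == 3) := by
  rw [show combine_es_fields_alt fields_list time_field
      = (PySem.List.sorted (fields_list.foldl (pvBStep time_field) []) (fun p => p.1)).map (fun p => p.2) from rfl]
  rw [B_pairs_eq, PySem.List.sorted_eq_foldl_insertBy]
  rw [show (fields_list.map (fun f => (pvPrio time_field f, f))).foldl
        (fun acc x => PySem.List.insertBy (fun a b => decide (a.1 < b.1)) x acc) []
      = (fields_list.map (fun f => (pvPrio time_field f, f))).foldl
        (fun acc x => PySem.List.insertBy (fun a b => decide (a.1 < b.1)) x acc)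
        (([] : List (Int × List (String × String))) ++ [] ++ [] ++ []) by simp]
  rw [foldl_insertBy_buckets _ [] [] [] [] (by simp) (by simp) (by simp) (by simp)
    (by intro p hp; rcases List.mem_map.1 hp with ⟨f, _, rfl⟩; exact prio_cases time_field f)]
  simp [List.filter_map, Function.comp_def, List.map_map]

-- ===== VERDICT (by name: the statement is the Claim_ definition above) =====
theorem combine_es_fields_spec : Claim_equal_combine_es_fields := by
  intro fields_list time_field _ _
  unfold Spec_combine_es_fields
  rw [B_eq_filters]
  rw [show combine_es_fields fields_list time_field
      = (fields_list.foldl (pvAStep time_field) ([], [], [], [])).1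
        ++ (fields_list.foldl (pvAStep time_field) ([], [], [], [])).2.2.1
        ++ (fields_list.foldl (pvAStep time_field) ([], [], [], [])).2.1
        ++ (fields_list.foldl (pvAStep time_field) ([], [], [], [])).2.2.2 from rfl]
  rw [A_eq_filters time_field fields_list [] [] [] []]
  simp
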